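-- pv_equiv track=rewrite | github.com/givka/advent-of-code | day4/main.py | check_if_two_times_in_inc
-- ===== SOURCE A (Python) =====
-- def check_if_two_times_in_inc(number: int) -> bool:
--     number_str = str(number)
--     current = int(number_str[0])
--     for index in range(1, len(number_str)):
--         value = int(number_str[index])
--         if current == value:
--             return True
--         current = value
--     return False
-- ===== SOURCE B (Python) =====
-- def check_if_two_times_in_inc(number: int) -> bool:
--     # Run-length encode the digit string (latest run kept first), then ask
--     # whether any run of equal consecutive digits has length >= 2.
--     runs = []  # list of (digit, count), most recent run at index 0
--     for c in str(number):
--         d = int(c)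
--         if runs and runs[0][0] == d:
--             runs[0] = (d, runs[0][1] + 1)
--         else:
--             runs.insert(0, (d, 1))
--     return any(count >= 2 for _, count in runs)
-- ===== Notes on version B (the rewrite author's own statement) =====
-- stated objective: alternative
-- what changed: B run-length encodes the digit string into (digit, count) runs in one pass and then reports whether any run has count >= 2, instead of A's indexed scan carrying a previous-digit accumulator with early return.
import Mathlib
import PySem

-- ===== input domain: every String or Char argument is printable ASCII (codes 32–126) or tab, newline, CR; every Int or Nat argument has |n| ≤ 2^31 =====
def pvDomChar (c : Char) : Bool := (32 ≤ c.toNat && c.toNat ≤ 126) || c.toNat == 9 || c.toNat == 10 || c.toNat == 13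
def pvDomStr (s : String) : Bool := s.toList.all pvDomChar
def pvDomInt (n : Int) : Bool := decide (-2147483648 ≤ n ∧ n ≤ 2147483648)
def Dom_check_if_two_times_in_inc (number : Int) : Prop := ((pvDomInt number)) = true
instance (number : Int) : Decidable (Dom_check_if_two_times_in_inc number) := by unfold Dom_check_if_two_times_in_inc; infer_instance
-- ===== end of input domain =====

-- B run-length encodes the digit string into (digit, count) runs and checks for a run of
-- length >= 2, instead of A's indexed scan with a previous-digit accumulator; objective: alternative.


-- ===== PORT A =====
-- the for-loop over range(1, len(number_str)): state is `current`; `int(s[index])` is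
-- PySem.Int.ofChars? on the one-character string (none = ValueError, excluded by Pre_)
def pvALoop (current : Int) : List Char → Bool
  | [] => false
  | c :: rest =>
    match PySem.Int.ofChars? [c] with
    | none => false   -- ValueError in Python; unreachable under Pre_
    | some value => if current == value then true else pvALoop value rest

def check_if_two_times_in_inc (number : Int) : Bool :=
  match PySem.Int.toChars number with      -- number_str = str(number)
  | [] => false                            -- unreachable: str(number) is nonempty
  | c0 :: rest =>
    match PySem.Int.ofChars? [c0] with     -- current = int(number_str[0])
    | none => false                        -- ValueError in Python; excluded by Pre_
    | some current => pvALoop current rest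

-- ===== PORT B =====
-- `if runs and runs[0][0] == d: bump runs[0] else: runs.insert(0, (d, 1))`
def pvAddRun (runs : List (Int × Int)) (d : Int) : List (Int × Int) :=
  match runs with
  | (d', n) :: rest => if d' == d then (d', n + 1) :: rest else (d, 1) :: (d', n) :: rest
  | [] => [(d, 1)]

-- the for-loop over str(number): state is `runs` (most recent run first)
def pvBRuns (runs : List (Int × Int)) : List Char → List (Int × Int)
  | [] => runs
  | c :: rest =>
    match PySem.Int.ofChars? [c] with
    | none => runs   -- ValueError in Python; unreachable under Pre_
    | some d => pvBRuns (pvAddRun runs d) rest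

def check_if_two_times_in_inc_alt (number : Int) : Bool :=
  (pvBRuns [] (PySem.Int.toChars number)).any fun p => decide (2 ≤ p.2)

-- ===== PRECONDITION & SPEC =====
-- Pre_ excludes negative numbers, on which A raises ValueError at int(str(number)[0]) = int('-').
def Pre_check_if_two_times_in_inc (number : Int) : Prop := 0 ≤ number
instance (number : Int) : Decidable (Pre_check_if_two_times_in_inc number) := by unfold Pre_check_if_two_times_in_inc; infer_instance
def pvWitness_check_if_two_times_in_inc : Int := 123

def Spec_check_if_two_times_in_inc (number : Int) (out : Bool) : Prop := out = check_if_two_times_in_inc_alt number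
instance (number : Int) (out : Bool) : Decidable (Spec_check_if_two_times_in_inc number out) := by unfold Spec_check_if_two_times_in_inc; infer_instance

-- ===== CLAIM (what is proved, stated in full; the proofs are below) =====
def Claim_equal_check_if_two_times_in_inc : Prop := ∀ (number : Int), Dom_check_if_two_times_in_inc number → Pre_check_if_two_times_in_inc number → Spec_check_if_two_times_in_inc number (check_if_two_times_in_inc number)

-- ===== LEMMAS AND PROOFS =====

theorem pv_digit_mem (c : Char) (h : c.isDigit = true) :
    c ∈ ['0','1','2','3','4','5','6','7','8','9'] := by
  simp [Char.isDigit] at h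
  have h1 : 48 ≤ c.toNat ∧ c.toNat ≤ 57 := by
    obtain ⟨ha, hb⟩ := h
    rw [UInt32.le_iff_toNat_le] at ha hb
    exact ⟨ha, hb⟩
  have h2 : c = Char.ofNat c.toNat := (Char.ofNat_toNat c).symm
  obtain ⟨ha, hb⟩ := h1
  set m := c.toNat with hm
  interval_cases m <;> simp [h2]

-- int() of a one-character digit string
theorem pv_parse_digit (c : Char) (h : c.isDigit = true) :
    PySem.Int.ofChars? [c] = some ((c.toNat : Int) - 48) := by
  have := pv_digit_mem c h
  fin_cases this <;> decide

-- loop invariant: with runs = (d₀,n₀)::rest (n₀ ≥ 1), B's run check equals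
-- "a finished run already has count ≥ 2, or A's scan from current = d₀ finds a pair"
theorem pv_runs_eq (cs : List Char) : ∀ (d₀ n₀ : Int) (rest : List (Int × Int)), 1 ≤ n₀ →
    (∀ c ∈ cs, c.isDigit = true) →
    ((pvBRuns ((d₀, n₀) :: rest) cs).any fun p => decide (2 ≤ p.2)) =
      (decide (2 ≤ n₀) || (rest.any fun p => decide (2 ≤ p.2)) || pvALoop d₀ cs) := by
  induction cs with
  | nil => intro d₀ n₀ rest _ _; simp [pvBRuns, pvALoop]
  | cons c t ih =>
    intro d₀ n₀ rest hn h
    have hc : c.isDigit = true := h c (by simp)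
    simp only [pvBRuns, pvALoop, pv_parse_digit c hc, pvAddRun]
    cases hb : (d₀ == ((c.toNat : Int) - 48)) with
    | true =>
      rw [if_pos rfl]
      rw [ih d₀ (n₀ + 1) rest (by omega) (fun d hd => h d (by simp [hd]))]
      have : (2 ≤ n₀ + 1) := by omega
      simp [this]
    | false =>
      rw [if_neg (by simp_all)]
      rw [ih _ 1 _ (by omega) (fun d hd => h d (by simp [hd]))]
      simp only [List.any_cons]
      have h1 : ¬ (2 ≤ (1 : Int)) := by omega
      simp [h1]

-- ===== VERDICT (by name: the statement is the Claim_ definition above) =====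
theorem check_if_two_times_in_inc_spec : Claim_equal_check_if_two_times_in_inc := by
  intro number _ hpre
  unfold Spec_check_if_two_times_in_inc check_if_two_times_in_inc check_if_two_times_in_inc_alt
  have htc : PySem.Int.toChars number = Nat.toDigits 10 number.toNat := by
    simp [PySem.Int.toChars, not_lt.mpr hpre]
  have hdig : ∀ c ∈ Nat.toDigits 10 number.toNat, c.isDigit = true :=
    fun c hc => Nat.isDigit_of_mem_toDigits (by omega) (by omega) hc
  rw [htc]
  cases hcs : Nat.toDigits 10 number.toNat with
  | nil =>
    have := Nat.length_toDigits_pos (b:=10) (n:=number.toNat)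
    simp [hcs] at this
  | cons c0 rest =>
    have h0 : c0.isDigit = true := hdig c0 (by simp [hcs])
    have hrest : ∀ c ∈ rest, c.isDigit = true := fun c hc => hdig c (by simp [hcs, hc])
    simp only [pv_parse_digit c0 h0, pvBRuns]
    rw [show pvAddRun [] ((c0.toNat : Int) - 48) = [(((c0.toNat : Int) - 48), 1)] from rfl]
    rw [pv_runs_eq rest _ 1 [] (by omega) hrest]
    simp
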